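-- pv_equiv track=rewrite | github.com/yuu-eguci/effort-leveling-support-eel | effort_leveling_support_eel.py | calculate
-- ===== SOURCE A (Python) =====
-- def calculate(ev: int, num: int) -> tuple:
--     """
--     振りたい努力値と、同時に処理したいポケモン数を指定すると、
--     パワーアイテムを各ポケモンに順番に持たせてそれぞれ群れバトルを x 回させ
--     その後パワーアイテムを持たせずに単体バトルを y 回すればいいと教えてくれます。
--
--     Parameters
--     ----------
--     ev : int
--         振りたい努力値数
--     num : int
--         同時に処理したいポケモン数
--
--     Returns
--     -------
--     x : int
--         上の説明参照
--     y : int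
--         上の説明参照
--     """
--
--     if ev <= 0 or num <= 0:
--         raise ValueError(f'Invalid value, ev:{ev}, num:{num}')
--
--     for x in range(100):
--         _ = (25 * x) + (x * 5 * (num - 1))
--         if _ > ev:
--             x -= 1
--             y = ev - ((25 * x) + (x * 5 * (num - 1)))
--             return (x, y)
-- ===== SOURCE B (Python) =====
-- def calculate(ev: int, num: int) -> tuple:
--     if ev <= 0 or num <= 0:
--         raise ValueError(f'Invalid value, ev:{ev}, num:{num}')
--     per = 5 * (num + 4)  # EV gained per hoard battle cycle: 25 + 5*(num-1)
--     x, y = divmod(ev, per)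
--     return (x, y)
-- ===== Notes on version B (the rewrite author's own statement) =====
-- stated objective: simpler
-- what changed: Replaces A's 100-iteration linear scan for the first overshooting battle count with a direct closed form: per = 5*(num+4) and (x, y) = divmod(ev, per).
-- outside the precondition, e.g. on calculate(10000, 1): A returns None, B returns (400, 0)
import Mathlib
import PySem

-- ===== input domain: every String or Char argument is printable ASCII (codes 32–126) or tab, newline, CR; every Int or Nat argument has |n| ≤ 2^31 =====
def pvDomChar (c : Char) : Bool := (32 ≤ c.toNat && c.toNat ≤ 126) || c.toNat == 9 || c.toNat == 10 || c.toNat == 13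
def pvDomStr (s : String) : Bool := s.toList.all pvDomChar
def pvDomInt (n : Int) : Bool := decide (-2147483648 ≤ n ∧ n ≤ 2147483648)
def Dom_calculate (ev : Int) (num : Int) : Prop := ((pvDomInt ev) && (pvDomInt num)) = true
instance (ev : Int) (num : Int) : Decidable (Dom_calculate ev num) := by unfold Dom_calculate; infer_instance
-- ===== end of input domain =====

-- B replaces A's bounded linear scan with the closed form (x, y) = divmod(ev, 5*(num+4)); objective: simpler.
-- ===== PORT A =====
-- A's for-loop over range(100) with an early return; (0,0) stands in for the
-- ValueError (ev ≤ 0 or num ≤ 0) and for falling off the loop returning None —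
-- both are excluded by Pre_calculate.
def calcLoopA (ev : Int) (num : Int) : List Int → Int × Int
  | [] => (0, 0)
  | x :: rest =>
      if (25 * x) + (x * 5 * (num - 1)) > ev then
        let x' := x - 1
        (x', ev - ((25 * x') + (x' * 5 * (num - 1))))
      else calcLoopA ev num rest

def calculate (ev : Int) (num : Int) : Int × Int :=
  if ev ≤ 0 ∨ num ≤ 0 then (0, 0)
  else calcLoopA ev num (PySem.List.pyRange 0 100 1)

-- ===== PORT B =====
-- (0,0) stands in for the ValueError, excluded by Pre_calculate.
def calculate_alt (ev : Int) (num : Int) : Int × Int :=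
  if ev ≤ 0 ∨ num ≤ 0 then (0, 0)
  else
    let per := 5 * (num + 4)
    (PySem.Int.floordiv ev per, PySem.Int.mod ev per)

-- ===== PRECONDITION & SPEC =====
-- Pre_ excludes ev ≤ 0 / num ≤ 0, где A raises ValueError, and ev ≥ 99*(5*(num+4)),
-- where A's bounded 100-iteration loop falls off the end and returns None (not a
-- tuple); B returns the closed-form pair there.
def Pre_calculate (ev : Int) (num : Int) : Prop :=
  0 < ev ∧ 0 < num ∧ ev < 99 * (5 * (num + 4))
instance (ev : Int) (num : Int) : Decidable (Pre_calculate ev num) := by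
  unfold Pre_calculate; infer_instance

def pvWitness_calculate : Int × Int := (100, 2)

def Spec_calculate (ev : Int) (num : Int) (out : Int × Int) : Prop := out = calculate_alt ev num
instance (ev : Int) (num : Int) (out : Int × Int) : Decidable (Spec_calculate ev num out) := by unfold Spec_calculate; infer_instance

-- ===== CLAIM (what is proved, stated in full; the proofs are below) =====
def Claim_equal_calculate : Prop := ∀ (ev : Int) (num : Int), Dom_calculate ev num → Pre_calculate ev num → Spec_calculate ev num (calculate ev num)

-- ===== LEMMAS AND PROOFS =====

-- The loop body's expression is x * per for per = 5*(num+4) minus... actually 25*x + x*5*(num-1) = x * (5*num+20).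
lemma body_eq (num x : Int) : (25 * x) + (x * 5 * (num - 1)) = x * (5 * (num + 4)) := by ring

-- Scanning [s, s+1, …, b) where s ≤ q+1 and q+1 < b finds its first trigger at q+1.
lemma calcLoopA_pyRange (ev num q : Int) (hper : (5 * (num + 4)) * q ≤ ev)
    (hper2 : ev < (5 * (num + 4)) * (q + 1)) :
    ∀ (n : Nat) (s : Int), s ≤ q + 1 → q + 1 < s + n →
      calcLoopA ev num (PySem.List.pyRange s (s + n) 1) = (q, ev - q * (5 * (num + 4))) := by
  intro n
  induction n with
  | zero => intro s hs h; omega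
  | succ m ih =>
      intro s hs h
      have hsb : s < s + (m + 1 : Nat) := by push_cast; omega
      rw [PySem.List.pyRange_one_cons hsb]
      rw [calcLoopA]
      rw [body_eq]
      by_cases hsq : s = q + 1
      · subst hsq
        have htr : ev < (q + 1) * (5 * (num + 4)) := by linarith [hper2, mul_comm (5 * (num + 4)) (q + 1)]
        rw [if_pos htr]
        simp only []
        have : q + 1 - 1 = q := by ring
        rw [this, body_eq]
      · have hslt : s ≤ q := by omega
        have hno : ¬ s * (5 * (num + 4)) > ev := by
          have hperpos : (0:Int) < 5 * (num + 4) ∨ 5 * (num + 4) ≤ 0 := by omega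
          rcases hperpos with hp | hp
          · have : s * (5 * (num + 4)) ≤ q * (5 * (num + 4)) :=
              mul_le_mul_of_nonneg_right hslt (le_of_lt hp)
            have := mul_comm q (5 * (num + 4))
            omega
          · -- per ≤ 0 contradicts hper & hper2: ev ≥ per*q and ev < per*(q+1) force per > 0
            nlinarith
        rw [if_neg hno]
        have : s + (m + 1 : Nat) = (s + 1) + (m : Nat) := by push_cast; ring
        rw [this]
        exact ih (s + 1) (by omega) (by push_cast at h ⊢; omega)

theorem calculate_spec : Claim_equal_calculate := by
  intro ev num _ hpre
  obtain ⟨hev, hnum, hbound⟩ := hpre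
  unfold Spec_calculate calculate calculate_alt
  have hneg : ¬ (ev ≤ 0 ∨ num ≤ 0) := by omega
  rw [if_neg hneg, if_neg hneg]
  set per : Int := 5 * (num + 4) with hperdef
  have hperpos : 0 < per := by omega
  set q : Int := PySem.Int.floordiv ev per with hq
  have hdiv : q * per ≤ ev ∧ ev < (q + 1) * per := by
    rw [hq]
    exact (PySem.Int.floordiv_eq_iff_of_pos hperpos).mp rfl
  have hmod : ev - q * per = PySem.Int.mod ev per := by
    have := PySem.Int.floordiv_mul_add_mod ev per
    rw [← hq] at this
    linarith
  have h1 : per * q ≤ ev := by rw [mul_comm]; exact hdiv.1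
  have h2 : ev < per * (q + 1) := by rw [mul_comm]; exact hdiv.2
  have hq99 : q + 1 < 0 + (100 : Nat) := by
    -- from ev < 99*per and per*q ≤ ev: q ≤ 98
    push_cast
    nlinarith
  have hq0 : (0:Int) ≤ q + 1 := by
    nlinarith
  have := calcLoopA_pyRange ev num q h1 h2 100 0 (by omega) hq99
  rw [(by norm_num : (0:Int) + (100:Nat) = 100)] at this
  rw [this]
  simp only [Prod.mk.injEq]
  exact ⟨rfl, hmod⟩
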